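-- pv_equiv track=rewrite | github.com/marcelopd20/dio-desafio-github-1-repo | BeeCrowd - Python/2724 - Ajude Patatatitu.py | ver
-- ===== SOURCE A (Python) =====
-- def ver(A, arr):
--     for k in arr:
--         if k in A:
--             if len(A) > int(A.index(k)+len(k)):
--                 if A[A.index(k)+len(k)].isalpha() and A[A.index(k)+len(k)].islower() or A[A.index(k)+len(k)].isnumeric():
--                     return ver(A, arr[1:])
--                 else:
--                     return 'Abortar'
--             else:
--                 return 'Abortar'
--     return 'Prossiga'
-- ===== SOURCE B (Python) =====
-- def ver(A, arr):
--     # One pass: each element of arr that occurs in A is checked against the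
--     # character following its first occurrence; any failing element aborts.
--     for k in arr:
--         if k in A:
--             pos = A.index(k) + len(k)
--             if not (pos < len(A) and ((A[pos].isalpha() and A[pos].islower()) or A[pos].isnumeric())):
--                 return 'Abortar'
--     return 'Prossiga'
-- ===== Notes on version B (the rewrite author's own statement) =====
-- stated objective: faster
-- what changed: A re-scans the whole arr from its front after every validated element (recursing on arr[1:]); B makes a single pass over arr, checking each element that occurs in A independently, which gives the same verdict because the validity test of an element depends only on A.
import Mathlib
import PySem

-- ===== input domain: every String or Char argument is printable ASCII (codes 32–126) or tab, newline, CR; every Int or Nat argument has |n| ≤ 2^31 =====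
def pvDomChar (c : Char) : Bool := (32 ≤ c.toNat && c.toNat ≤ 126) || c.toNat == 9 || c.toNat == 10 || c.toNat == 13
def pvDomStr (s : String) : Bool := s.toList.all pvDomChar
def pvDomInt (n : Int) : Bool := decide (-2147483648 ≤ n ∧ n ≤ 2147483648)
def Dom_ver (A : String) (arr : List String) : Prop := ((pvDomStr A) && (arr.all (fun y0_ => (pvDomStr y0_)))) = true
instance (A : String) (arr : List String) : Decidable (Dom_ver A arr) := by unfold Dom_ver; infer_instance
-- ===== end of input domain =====

-- B replaces A's rescan-and-recurse with a single pass over arr checking each element independently (same result; no recursion).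
-- ('.isnumeric()' on one character is ported as PySem.Chars.isdigit, exact on the ASCII domain.)

-- ===== PORT A =====
-- the for-loop's scan for the first k with 'k in A'
def verScan (A : String) : List String → Option String
  | [] => none
  | k :: rest => if PySem.Str.isIn k A then some k else verScan A rest

def ver (A : String) (arr : List String) : String :=
  match arr with
  | [] => "Prossiga"                      -- empty arr: the for-loop finds nothing
  | k0 :: rest =>                         -- rest = arr[1:]
    match verScan A (k0 :: rest) with
    | none => "Prossiga"
    | some k =>
      if (PySem.Str.len A : Int) > PySem.Str.find A k + PySem.Str.len k then
        match PySem.Str.pyGet? A (PySem.Str.find A k + PySem.Str.len k) with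
        | some c =>
          if (PySem.Chars.isalpha c && PySem.Chars.islower c) || PySem.Chars.isdigit c
          then ver A rest                 -- return ver(A, arr[1:])
          else "Abortar"
        | none => "Abortar"               -- unreachable: index guarded by the length test
      else "Abortar"

-- ===== PORT B =====
-- Source B's validity test: pos < len(A) and ((A[pos].isalpha() and A[pos].islower()) or A[pos].isnumeric())
def verOk (A : String) (pos : Int) : Bool :=
  decide (pos < (PySem.Str.len A : Int)) &&
    (match PySem.Str.pyGet? A pos with
     | some c => (PySem.Chars.isalpha c && PySem.Chars.islower c) || PySem.Chars.isdigit c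
     | none => false)

def ver_alt (A : String) (arr : List String) : String :=
  match arr with
  | [] => "Prossiga"
  | k :: rest =>
    if PySem.Str.isIn k A then
      if !(verOk A (PySem.Str.find A k + PySem.Str.len k)) then "Abortar"
      else ver_alt A rest
    else ver_alt A rest

-- ===== PRECONDITION & SPEC =====
def Spec_ver (A : String) (arr : List String) (out : String) : Prop := out = ver_alt A arr
instance (A : String) (arr : List String) (out : String) : Decidable (Spec_ver A arr out) := by unfold Spec_ver; infer_instance

-- ===== CLAIM (what is proved, stated in full; the proofs are below) =====
def Claim_equal_ver : Prop := ∀ (A : String) (arr : List String), Dom_ver A arr → Spec_ver A arr (ver A arr)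

-- ===== LEMMAS AND PROOFS =====

theorem verScan_cons_not (A k : String) (rest : List String)
    (h : PySem.Chars.isIn k.toList A.toList = false) :
    verScan A (k :: rest) = verScan A rest := by
  simp [verScan, h]

-- a skipped front element not occurring in A does not change A's result
theorem ver_cons_not_in (A k : String) (rest : List String)
    (h : PySem.Str.isIn k A = false) : ver A (k :: rest) = ver A rest := by
  have h' : PySem.Chars.isIn k.toList A.toList = false := by simpa using h
  cases rest with
  | nil => simp [ver, verScan, h']
  | cons k1 r1 =>
    rcases hx : verScan A (k1 :: r1) with _ | k'
    · conv_lhs => rw [ver, verScan_cons_not A k _ h', hx]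
      conv_rhs => rw [ver, hx]
    · conv_lhs => rw [ver, verScan_cons_not A k _ h', hx]
      conv_rhs => rw [ver, hx]
      dsimp only
      split_ifs with hc
      · rcases hg : PySem.Str.pyGet? A (PySem.Str.find A k' + PySem.Str.len k') with _ | c
        · rfl
        · dsimp only
          split_ifs with hc2
          · conv_lhs => rw [ver, hx]
            simp at hc hg ⊢
            simp [hc, hg]
            intro h1 h2
            simp [h2, Bool.and_eq_true] at hc2
            exact absurd hc2.2 (by simp [h1 hc2.1])
          · rfl
      · rfl
theorem ver_eq_alt (A : String) (arr : List String) : ver A arr = ver_alt A arr := by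
  induction arr with
  | nil => rfl
  | cons k rest ih =>
    cases hin : PySem.Str.isIn k A with
    | false =>
      rw [ver_cons_not_in A k rest hin, ih]
      have hin' : PySem.Chars.isIn k.toList A.toList = false := by simpa using hin
      simp [ver_alt, hin']
    | true =>
      have hin' : PySem.Chars.isIn k.toList A.toList = true := by simpa using hin
      conv_lhs => rw [ver]
      rw [show verScan A (k :: rest) = some k from by simp [verScan, hin']]
      conv_rhs => rw [ver_alt]
      dsimp only
      by_cases hlen : PySem.Str.find A k + PySem.Str.len k < (PySem.Str.len A : Int)
      · rw [if_pos hlen]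
        rcases hg : PySem.Str.pyGet? A (PySem.Str.find A k + PySem.Str.len k) with _ | c
        · simp [verOk, hin', hlen, hg]
          simp at hg hlen
          simp [hg, hlen]
        · by_cases hp : (PySem.Chars.isalpha c && PySem.Chars.islower c || PySem.Chars.isdigit c) = true
          · simp [verOk, hin', hlen, hg, hp, ih]
            simp at hg hlen
            simp [hg, hlen, hp]
          · simp [verOk, hin', hlen, hg, hp, ih]
            simp at hg hlen hp
            simp [hg, hlen, hp]
            intro h1 h2
            simp [hp.1 h1] at h2
      · rw [if_neg hlen]
        simp [verOk, hin', hlen]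
        simp at hlen
        simp [hlen]

-- ===== VERDICT (by name: the statement is the Claim_ definition above) =====
theorem ver_spec : Claim_equal_ver := by
  intro A arr _
  unfold Spec_ver
  exact ver_eq_alt A arr
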